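-- pv_equiv track=rewrite | github.com/Grazina-S/SheGoesTech_GS | Day9 homework solution.py | compare_strings_v3
-- ===== SOURCE A (Python) =====
-- def compare_strings_v3 (text1, text2, text3):
--     text1 = text1.lower()
--     text2 = text2.lower()
--     text3 = text3.lower()
--     result =""
--     for c in text1:
--         if c in text2  and c not in text3 and c not in result:
--             result += c
--     return "".join(sorted(result))
-- ===== SOURCE B (Python) =====
-- def compare_strings_v3(text1, text2, text3):
--     result = (set(text1.lower()) & set(text2.lower())) - set(text3.lower())
--     return "".join(sorted(result))
-- ===== Notes on version B (the rewrite author's own statement) =====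
-- stated objective: faster
-- what changed: The explicit per-character scan with manual dedup and substring membership tests is replaced by whole-string set construction and set algebra ((set&set)-set) followed by one sort, removing the inner scans over text2/text3/result.
import Mathlib
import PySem

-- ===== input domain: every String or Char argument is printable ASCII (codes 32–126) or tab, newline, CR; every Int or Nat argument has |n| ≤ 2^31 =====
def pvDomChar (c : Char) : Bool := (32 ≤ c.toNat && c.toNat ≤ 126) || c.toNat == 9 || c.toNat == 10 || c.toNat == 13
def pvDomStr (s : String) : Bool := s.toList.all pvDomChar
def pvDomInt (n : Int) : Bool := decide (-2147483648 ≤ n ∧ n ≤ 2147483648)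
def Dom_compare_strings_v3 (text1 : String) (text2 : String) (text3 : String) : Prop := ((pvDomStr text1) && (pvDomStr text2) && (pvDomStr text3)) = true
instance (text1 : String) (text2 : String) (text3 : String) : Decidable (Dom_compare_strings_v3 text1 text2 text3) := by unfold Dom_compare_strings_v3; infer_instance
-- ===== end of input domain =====

-- B replaces A's per-character scan with a manual dedup accumulator by set algebra
-- (intersection/difference of the three lowered character sets) plus one sort; same result, simpler.

-- ===== PORT A =====
-- literal port: lowercase all three, then scan text1 appending each char that is in text2,
-- not in text3, and not yet in the accumulator; finally join(sorted(result)).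
def compare_strings_v3 (text1 : String) (text2 : String) (text3 : String) : String :=
  let t1 := PySem.Chars.lower text1.toList
  let t2 := PySem.Chars.lower text2.toList
  let t3 := PySem.Chars.lower text3.toList
  let result := t1.foldl (fun acc c =>
    if PySem.Chars.isIn [c] t2 && !PySem.Chars.isIn [c] t3 && !PySem.Chars.isIn [c] acc
    then acc ++ [c] else acc) []
  String.mk (PySem.List.sorted result (fun x => x) false)

-- ===== PORT B =====
-- literal port of Source B: (set(t1) & set(t2)) - set(t3), joined after one sort.
def compare_strings_v3_alt (text1 : String) (text2 : String) (text3 : String) : String :=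
  let s1 := PySem.Set.ofList (PySem.Chars.lower text1.toList)
  let s2 := PySem.Set.ofList (PySem.Chars.lower text2.toList)
  let s3 := PySem.Set.ofList (PySem.Chars.lower text3.toList)
  String.mk (PySem.List.sorted (PySem.Set.diff (PySem.Set.inter s1 s2) s3) (fun x => x) false)

-- ===== PRECONDITION & SPEC =====
def Spec_compare_strings_v3 (text1 : String) (text2 : String) (text3 : String) (out : String) : Prop := out = compare_strings_v3_alt text1 text2 text3
instance (text1 : String) (text2 : String) (text3 : String) (out : String) : Decidable (Spec_compare_strings_v3 text1 text2 text3 out) := by unfold Spec_compare_strings_v3; infer_instance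

-- ===== CLAIM (what is proved, stated in full; the proofs are below) =====
def Claim_equal_compare_strings_v3 : Prop := ∀ (text1 : String) (text2 : String) (text3 : String), Dom_compare_strings_v3 text1 text2 text3 → Spec_compare_strings_v3 text1 text2 text3 (compare_strings_v3 text1 text2 text3)

-- ===== LEMMAS AND PROOFS =====

-- Python's `c in s` on a single char is membership of that char
theorem isIn_singleton_iff (c : Char) (l : List Char) :
    PySem.Chars.isIn [c] l = true ↔ c ∈ l := by
  rw [PySem.Chars.isIn_iff_infix]
  constructor
  · intro h
    exact (List.singleton_sublist).mp h.sublist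
  · intro h
    obtain ⟨s, t, rfl⟩ := List.append_of_mem h
    exact ⟨s, t, by simp⟩

-- invariant of A's accumulator loop: nodup is preserved and membership is
-- "already in acc, or a char of the remaining input that is in t2 and not in t3"
theorem loop_invariant (t2 t3 : List Char) (l1 : List Char) :
    ∀ acc : List Char, acc.Nodup →
      (l1.foldl (fun acc c =>
        if PySem.Chars.isIn [c] t2 && !PySem.Chars.isIn [c] t3 && !PySem.Chars.isIn [c] acc
        then acc ++ [c] else acc) acc).Nodup ∧
      ∀ x, x ∈ l1.foldl (fun acc c =>
        if PySem.Chars.isIn [c] t2 && !PySem.Chars.isIn [c] t3 && !PySem.Chars.isIn [c] acc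
        then acc ++ [c] else acc) acc ↔
        x ∈ acc ∨ (x ∈ l1 ∧ x ∈ t2 ∧ x ∉ t3) := by
  induction l1 with
  | nil => intro acc h; exact ⟨h, by simp⟩
  | cons c rest ih =>
    intro acc hacc
    simp only [List.foldl_cons]
    by_cases hcond : (PySem.Chars.isIn [c] t2 && !PySem.Chars.isIn [c] t3 && !PySem.Chars.isIn [c] acc) = true
    · rw [if_pos hcond]
      simp only [Bool.and_eq_true, Bool.not_eq_true', ← Bool.not_eq_true,
        isIn_singleton_iff] at hcond
      obtain ⟨⟨h2, h3⟩, hna⟩ := hcond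
      have hacc' : (acc ++ [c]).Nodup := by
        simp [List.nodup_append, hacc]
        exact fun a ha h => hna (h ▸ ha)
      obtain ⟨hn, hm⟩ := ih (acc ++ [c]) hacc'
      refine ⟨hn, fun x => ?_⟩
      rw [hm x]
      simp only [List.mem_append, List.mem_cons, List.not_mem_nil, or_false]
      constructor
      · rintro ((hx | rfl) | ⟨hr, ht⟩)
        · exact Or.inl hx
        · exact Or.inr ⟨Or.inl rfl, h2, h3⟩
        · exact Or.inr ⟨Or.inr hr, ht⟩
      · rintro (hx | ⟨(rfl | hr), ht⟩)
        · exact Or.inl (Or.inl hx)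
        · exact Or.inl (Or.inr rfl)
        · exact Or.inr ⟨hr, ht⟩
    · rw [if_neg hcond]
      simp only [Bool.and_eq_true, Bool.not_eq_true', ← Bool.not_eq_true,
        isIn_singleton_iff, not_and, not_not] at hcond
      obtain ⟨hn, hm⟩ := ih acc hacc
      refine ⟨hn, fun x => ?_⟩
      rw [hm x]
      simp only [List.mem_cons]
      constructor
      · rintro (hx | ⟨hr, ht⟩)
        · exact Or.inl hx
        · exact Or.inr ⟨Or.inr hr, ht⟩
      · rintro (hx | ⟨(rfl | hr), ht⟩)
        · exact Or.inl hx
        · exact Or.inl (hcond ht)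
        · exact Or.inr ⟨hr, ht⟩

-- sorted of a nodup list is strictly increasing
theorem sorted_pairwise_lt_of_nodup (xs : List Char) (h : xs.Nodup) :
    (PySem.List.sorted xs (fun x => x) false).Pairwise (· < ·) := by
  have h1 := PySem.List.sorted_pairwise (xs := xs) (key := fun x => x)
  have h2 : (PySem.List.sorted xs (fun x => x) false).Nodup :=
    (PySem.List.sorted_perm xs (fun x => x) false).nodup_iff.mpr h
  exact (h1.and h2).imp fun ⟨hle, hne⟩ => lt_of_le_of_ne hle hne

-- ===== VERDICT (by name: the statement is the Claim_ definition above) =====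
theorem compare_strings_v3_spec : Claim_equal_compare_strings_v3 := by
  intro text1 text2 text3 _
  unfold Spec_compare_strings_v3
  simp only [compare_strings_v3, compare_strings_v3_alt]
  set t1 := PySem.Chars.lower text1.toList with ht1
  set t2 := PySem.Chars.lower text2.toList with ht2
  set t3 := PySem.Chars.lower text3.toList with ht3
  obtain ⟨hnA, hmA⟩ := loop_invariant t2 t3 t1 [] List.nodup_nil
  set A := t1.foldl (fun acc c =>
    if PySem.Chars.isIn [c] t2 && !PySem.Chars.isIn [c] t3 && !PySem.Chars.isIn [c] acc
    then acc ++ [c] else acc) [] with hA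
  set B := PySem.Set.diff (PySem.Set.inter (PySem.Set.ofList t1) (PySem.Set.ofList t2))
    (PySem.Set.ofList t3) with hB
  have hnB : B.Nodup :=
    PySem.Set.nodup_diff _ _ (PySem.Set.nodup_inter _ _ (PySem.Set.nodup_ofList _))
  have hperm : A.Perm B := by
    rw [List.perm_ext_iff_of_nodup hnA hnB]
    intro x
    rw [hmA x, hB]
    simp [PySem.Set.mem_diff, PySem.Set.mem_inter, PySem.Set.mem_ofList, and_assoc]
  have hs : PySem.List.sorted A (fun x => x) false = PySem.List.sorted B (fun x => x) false := by
    apply PySem.List.sorted_eq_of_perm_of_pairwise_lt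
    · exact ((PySem.List.sorted_perm B (fun x => x) false).trans hperm.symm)
    · exact sorted_pairwise_lt_of_nodup B hnB
  rw [hs]
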